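-- pv_equiv track=rewrite | github.com/darki73/sylvan | src/sylvan/indexing/languages/javascript.py | _expand_ts_alias
-- ===== SOURCE A (Python) =====
-- def _expand_ts_alias(
--     specifier: str,
--     aliases: dict[str, list[str]],
-- ) -> str | None:
--     """Expand a tsconfig path alias to a repo-relative path.
--
--     Args:
--         specifier: Import specifier (e.g. ``@/lib/utils``).
--         aliases: Alias prefix to directory list mapping.
--
--     Returns:
--         Expanded repo-relative path without extension, or None.
--     """
--     for alias in sorted(aliases, key=len, reverse=True):
--         if specifier == alias or specifier.startswith(alias + "/"):
--             remainder = specifier[len(alias) :].lstrip("/")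
--             for target_dir in aliases[alias]:
--                 if remainder:
--                     return f"{target_dir}/{remainder}"
--                 return target_dir
--     return None
-- ===== SOURCE B (Python) =====
-- def _expand_ts_alias(
--     specifier: str,
--     aliases: dict[str, list[str]],
-- ) -> str | None:
--     """Expand a tsconfig path alias to a repo-relative path (single linear scan)."""
--     best = None
--     for alias, dirs in aliases.items():
--         if (
--             dirs
--             and (specifier == alias or specifier.startswith(alias + "/"))
--             and (best is None or len(alias) > len(best[0]))
--         ):
--             best = (alias, dirs)
--     if best is None:
--         return None
--     alias, dirs = best
--     remainder = specifier[len(alias):].lstrip("/")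
--     return f"{dirs[0]}/{remainder}" if remainder else dirs[0]
-- ===== Notes on version B (the rewrite author's own statement) =====
-- stated objective: alternative
-- what changed: Replaces A's length-descending stable sort of the alias keys followed by a first-match scan with a single linear pass over aliases.items() that tracks the best (longest, first-on-ties, non-empty-dirs) matching alias, formatting the result once after the loop.
import Mathlib
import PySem

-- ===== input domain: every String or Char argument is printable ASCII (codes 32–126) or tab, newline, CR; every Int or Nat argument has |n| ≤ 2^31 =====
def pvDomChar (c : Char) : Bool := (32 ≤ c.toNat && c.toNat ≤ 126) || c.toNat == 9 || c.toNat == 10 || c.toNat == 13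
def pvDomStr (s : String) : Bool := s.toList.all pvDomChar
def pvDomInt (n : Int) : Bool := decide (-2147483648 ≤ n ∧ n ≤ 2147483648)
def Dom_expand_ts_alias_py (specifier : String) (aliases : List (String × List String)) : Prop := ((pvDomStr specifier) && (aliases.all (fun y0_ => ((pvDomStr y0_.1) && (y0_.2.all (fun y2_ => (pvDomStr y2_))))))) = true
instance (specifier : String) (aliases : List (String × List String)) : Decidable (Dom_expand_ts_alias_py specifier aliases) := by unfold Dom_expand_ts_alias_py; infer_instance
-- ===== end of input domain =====

-- B replaces A's length-sort over the alias keys by a single linear best-match scan (no sort); same return value everywhere.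

-- shared primitive helpers (both Pythons contain these very expressions)
-- exact port of s.lstrip("/"): drop leading '/' characters
def pvLstripSlash (s : String) : String := String.mk (s.toList.dropWhile (· == '/'))

-- specifier == alias or specifier.startswith(alias + "/")
def pvMatch (specifier al : String) : Bool :=
  specifier == al || PySem.Str.startswith specifier (al ++ "/")

-- specifier[len(alias):].lstrip("/")
def pvRemainder (specifier al : String) : String :=
  pvLstripSlash (PySem.Str.slice specifier (some (PySem.Str.len al)) none)

-- ===== PORT A =====
-- inner 'for target_dir in aliases[alias]:' loop (returns on its first iteration)
def pvInnerA (remainder : String) : List String → Option String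
  | [] => none
  | t :: _ => some (if remainder ≠ "" then t ++ "/" ++ remainder else t)

-- outer 'for alias in sorted(aliases, key=len, reverse=True):' loop
def pvLoopA (specifier : String) (d : PySem.Dict String (List String)) : List String → Option String
  | [] => none
  | a :: rest =>
    if pvMatch specifier a then
      match pvInnerA (pvRemainder specifier a) (d.getD a []) with
      | some r => some r
      | none => pvLoopA specifier d rest
    else pvLoopA specifier d rest

def expand_ts_alias_py (specifier : String) (aliases : List (String × List String)) : Option String :=
  let d := PySem.Dict.ofList aliases
  pvLoopA specifier d (PySem.List.sorted d.keys (fun k => PySem.Str.len k) true)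

-- ===== PORT B =====
-- best is None or len(alias) > len(best[0])
def pvBetter (best : Option (String × List String)) (p : String × List String) : Bool :=
  match best with
  | none => true
  | some b => decide (PySem.Str.len b.1 < PySem.Str.len p.1)

-- loop body: dirs and (match) and (better) -> best = (alias, dirs)
def pvStep (specifier : String) (best : Option (String × List String)) (p : String × List String) :
    Option (String × List String) :=
  if (!p.2.isEmpty) && pvMatch specifier p.1 && pvBetter best p then some p else best

def expand_ts_alias_py_alt (specifier : String) (aliases : List (String × List String)) : Option String :=
  match (PySem.Dict.ofList aliases).items.foldl (pvStep specifier) none with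
  | none => none
  | some (a, dirs) =>
    let remainder := pvRemainder specifier a
    -- dirs[0]: the loop only stores pairs with non-empty dirs, so headD's default is never used
    some (if remainder ≠ "" then dirs.headD "" ++ "/" ++ remainder else dirs.headD "")

-- ===== PRECONDITION & SPEC =====
def Spec_expand_ts_alias_py (specifier : String) (aliases : List (String × List String)) (out : Option String) : Prop := out = expand_ts_alias_py_alt specifier aliases
instance (specifier : String) (aliases : List (String × List String)) (out : Option String) : Decidable (Spec_expand_ts_alias_py specifier aliases out) := by unfold Spec_expand_ts_alias_py; infer_instance

-- ===== CLAIM (what is proved, stated in full; the proofs are below) =====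
def Claim_equal_expand_ts_alias_py : Prop := ∀ (specifier : String) (aliases : List (String × List String)), Dom_expand_ts_alias_py specifier aliases → Spec_expand_ts_alias_py specifier aliases (expand_ts_alias_py specifier aliases)

-- ===== LEMMAS AND PROOFS =====

-- the predicate A's outer loop effectively searches for: alias matches and its dirs list is non-empty
def pvQ (specifier : String) (d : PySem.Dict String (List String)) (a : String) : Bool :=
  pvMatch specifier a && !(d.getD a []).isEmpty

-- key-level counterpart of B's loop step
def pvStepK (specifier : String) (d : PySem.Dict String (List String))
    (b : Option String) (k : String) : Option String :=
  if pvQ specifier d k &&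
      (match b with
       | none => true
       | some m => decide (PySem.Str.len m < PySem.Str.len k)) then some k else b

-- A's scan is find? of pvQ followed by the inner loop
theorem loopA_eq_find (specifier : String) (d : PySem.Dict String (List String)) :
    ∀ ks : List String,
      pvLoopA specifier d ks =
        (ks.find? (pvQ specifier d)).bind (fun k => pvInnerA (pvRemainder specifier k) (d.getD k [])) := by
  intro ks
  induction ks with
  | nil => rfl
  | cons a rest ih =>
    by_cases hm : pvMatch specifier a
    · cases hd : d.getD a [] with
      | nil =>
        have hq : pvQ specifier d a = false := by simp [pvQ, hd, hm]
        simp [pvLoopA, hm, hd, pvInnerA, List.find?_cons, hq, ih]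
      | cons t ts =>
        have hq : pvQ specifier d a = true := by simp [pvQ, hd, hm]
        simp [pvLoopA, hm, hd, pvInnerA, List.find?_cons, hq]
    · have hq : pvQ specifier d a = false := by simp [pvQ, hm]
      simp [pvLoopA, hm, List.find?_cons, hq, ih]

-- inserting x into a key-descending list moves it past every strictly longer (and, by stability,
-- every equal-length) element: find? of the result is the strict-max update of find? of the list
theorem find?_insertBy {α : Type} (P : α → Bool) (key : α → Int) (x : α) :
    ∀ s : List α, s.Pairwise (fun a b => key b ≤ key a) →
      (PySem.List.insertBy (fun a b => decide (key b < key a)) x s).find? P =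
        if P x && (match s.find? P with
                   | none => true
                   | some m => decide (key m < key x)) then some x else s.find? P := by
  intro s
  induction s with
  | nil =>
    intro _
    by_cases hp : P x <;> simp [PySem.List.insertBy, List.find?, hp]
  | cons y ys ih =>
    intro hpw
    obtain ⟨hyall, hpw'⟩ := List.pairwise_cons.mp hpw
    by_cases hcmp : key y < key x
    · rw [show PySem.List.insertBy (fun a b => decide (key b < key a)) x (y :: ys) = x :: y :: ys from by
        simp [PySem.List.insertBy, hcmp]]
      cases hf : (y :: ys).find? P with
      | none =>
        by_cases hp : P x
        · rw [List.find?_cons_of_pos hp]; simp [hp]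
        · rw [List.find?_cons_of_neg hp, hf]; simp [hp]
      | some m =>
        have hmlt : key m < key x := by
          refine lt_of_le_of_lt ?_ hcmp
          rcases List.mem_cons.mp (List.mem_of_find?_eq_some hf) with h | h
          · exact le_of_eq (congrArg key h)
          · exact hyall m h
        by_cases hp : P x
        · rw [List.find?_cons_of_pos hp]; simp [hp, hmlt]
        · rw [List.find?_cons_of_neg hp, hf]; simp [hp]
    · rw [show PySem.List.insertBy (fun a b => decide (key b < key a)) x (y :: ys)
            = y :: PySem.List.insertBy (fun a b => decide (key b < key a)) x ys from by
        simp [PySem.List.insertBy, hcmp]]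
      by_cases hpy : P y
      · rw [List.find?_cons_of_pos hpy, List.find?_cons_of_pos hpy]
        simp [hcmp]
      · rw [List.find?_cons_of_neg hpy, List.find?_cons_of_neg hpy, ih hpw']

-- find? over the stable reverse sort IS the linear strict-max scan
theorem find?_sorted_rev_eq_foldl {α : Type} (P : α → Bool) (key : α → Int) (l : List α) :
    (PySem.List.sorted l key true).find? P =
      l.foldl (fun b x =>
        if P x && (match b with
                   | none => true
                   | some m => decide (key m < key x)) then some x else b) none := by
  induction l using List.reverseRecOn with
  | nil => rfl
  | append_singleton l x ih =>
    have h1 : PySem.List.sorted (l ++ [x]) key true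
        = PySem.List.insertBy (fun a b => decide (key b < key a)) x (PySem.List.sorted l key true) := by
      rw [PySem.List.sorted_rev_eq_foldl_insertBy, PySem.List.sorted_rev_eq_foldl_insertBy,
        List.foldl_append, List.foldl_cons, List.foldl_nil]
    rw [h1, List.foldl_append, List.foldl_cons, List.foldl_nil, ← ih,
      find?_insertBy P key x _ (PySem.List.sorted_pairwise_rev l key)]

-- one step of B's pair-level loop is one step of the key-level loop, re-paired through the lookup
theorem step_pairs_eq_step_key (specifier : String) (d : PySem.Dict String (List String))
    (b : Option (String × List String)) (p : String × List String)
    (hp : d.getD p.1 [] = p.2) (hb : ∀ q, b = some q → d.getD q.1 [] = q.2) :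
    pvStep specifier b p =
      (pvStepK specifier d (b.map Prod.fst) p.1).map (fun k => (k, d.getD k [])) := by
  cases b with
  | none =>
    by_cases h1 : p.2.isEmpty <;> by_cases h2 : pvMatch specifier p.1 <;>
      simp [pvStep, pvStepK, pvBetter, pvQ, hp, h1, h2]
  | some q =>
    have hq : d.getD q.1 [] = q.2 := hb q rfl
    by_cases h1 : p.2.isEmpty <;> by_cases h2 : pvMatch specifier p.1 <;>
      by_cases h3 : q.1.length < p.1.length <;>
      simp [pvStep, pvStepK, pvBetter, pvQ, PySem.Str.len_eq, hp, hq, h1, h2, h3]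

-- B's pair-level fold is the key-level fold re-paired through the dict lookup
theorem fold_pairs_eq_fold_keys (specifier : String) (d : PySem.Dict String (List String)) :
    ∀ (l : List (String × List String)) (b : Option (String × List String)),
      (∀ p ∈ l, d.getD p.1 [] = p.2) →
      (∀ q, b = some q → d.getD q.1 [] = q.2) →
      l.foldl (pvStep specifier) b =
        ((l.map Prod.fst).foldl (pvStepK specifier d) (b.map Prod.fst)).map
          (fun k => (k, d.getD k [])) := by
  intro l
  induction l with
  | nil =>
    intro b _ hb
    cases b with
    | none => rfl
    | some q => simp [hb q rfl]
  | cons p rest ih =>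
    intro b hl hb
    have hp : d.getD p.1 [] = p.2 := hl p List.mem_cons_self
    have hrest : ∀ q ∈ rest, d.getD q.1 [] = q.2 := fun q hq => hl q (List.mem_cons_of_mem _ hq)
    have hbnew : ∀ q, pvStep specifier b p = some q → d.getD q.1 [] = q.2 := by
      intro q hq
      unfold pvStep at hq
      split at hq
      · cases hq; exact hp
      · exact hb q hq
    rw [List.map_cons, List.foldl_cons, List.foldl_cons, ih (pvStep specifier b p) hrest hbnew,
      step_pairs_eq_step_key specifier d b p hp hb]
    cases hk : pvStepK specifier d (b.map Prod.fst) p.1 <;> simp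

-- one key-level step either keeps the accumulator or stores a pvQ-satisfying key
theorem stepK_or (specifier : String) (d : PySem.Dict String (List String))
    (b : Option String) (a : String) :
    pvStepK specifier d b a = b ∨
      (pvStepK specifier d b a = some a ∧ pvQ specifier d a = true) := by
  unfold pvStepK
  cases b with
  | none =>
    by_cases h : (pvQ specifier d a && true) = true
    · exact Or.inr ⟨by rw [if_pos h], ((Bool.and_eq_true _ _).mp h).1⟩
    · exact Or.inl (by rw [if_neg h])
  | some m =>
    by_cases h : (pvQ specifier d a && decide (PySem.Str.len m < PySem.Str.len a)) = true
    · exact Or.inr ⟨by rw [if_pos h], ((Bool.and_eq_true _ _).mp h).1⟩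
    · exact Or.inl (by rw [if_neg h])

-- any some-result of the key-level fold satisfies pvQ
theorem foldK_satisfies (specifier : String) (d : PySem.Dict String (List String)) :
    ∀ (l : List String) (b : Option String),
      (∀ k, b = some k → pvQ specifier d k = true) →
      ∀ k, l.foldl (pvStepK specifier d) b = some k → pvQ specifier d k = true := by
  intro l
  induction l with
  | nil => intro b hb k hk; exact hb k hk
  | cons a rest ih =>
    intro b hb k hk
    rw [List.foldl_cons] at hk
    refine ih (pvStepK specifier d b a) ?_ k hk
    intro k' hk'
    rcases stepK_or specifier d b a with hcase | ⟨hcase, hqa⟩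
    · exact hb k' (hcase ▸ hk')
    · rw [hcase] at hk'
      cases hk'
      exact hqa

-- ===== VERDICT (by name: the statement is the Claim_ definition above) =====
theorem expand_ts_alias_py_spec : Claim_equal_expand_ts_alias_py := by
  intro specifier aliases _
  unfold Spec_expand_ts_alias_py
  unfold expand_ts_alias_py expand_ts_alias_py_alt
  set d := PySem.Dict.ofList aliases with hd
  have hnd : d.keys.Nodup := PySem.Dict.nodup_keys_ofList aliases
  have hitems : ∀ p ∈ d.items, d.getD p.1 [] = p.2 := by
    intro p hp
    exact PySem.Dict.getD_of_mem_items d (by exact hp) hnd []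
  -- B's fold, reduced to the key-level fold over the dict's keys
  rw [fold_pairs_eq_fold_keys specifier d d.items none hitems (by intro q h; cases h)]
  have hkeys : d.items.map Prod.fst = d.keys := rfl
  rw [hkeys]
  -- A's loop, reduced to the same key-level fold
  have hA : (PySem.List.sorted d.keys (fun k => PySem.Str.len k) true).find? (pvQ specifier d)
      = d.keys.foldl (pvStepK specifier d) none := by
    rw [find?_sorted_rev_eq_foldl (pvQ specifier d) (fun k => PySem.Str.len k) d.keys]
    congr 1
    funext b x
    cases b <;> simp [pvStepK]
  rw [loopA_eq_find specifier d, hA]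
  rw [show (Option.map Prod.fst (none : Option (String × List String))) = none from rfl]
  -- compare the two post-processings of the common fold result
  cases hres : d.keys.foldl (pvStepK specifier d) none with
  | none => rfl
  | some k =>
    have hq : pvQ specifier d k = true :=
      foldK_satisfies specifier d d.keys none (by intro k' h; cases h) k hres
    have hne : ((d.getD k []).isEmpty) = false := by
      have := ((Bool.and_eq_true _ _).mp hq).2
      simpa using this
    cases hdk : d.getD k [] with
    | nil => simp [hdk] at hne
    | cons t ts => simp [pvInnerA, hdk]
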